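-- pv_equiv track=rewrite | github.com/bbcoolyeet/Python-Learn- | 3rd_problem_with_bat.py | batseq
-- ===== SOURCE A (Python) =====
-- def batseq(firststr, secondstr):
--   if len(secondstr) ==0:
--     return True
--   if len(firststr) ==0 and len(secondstr)>0:
--     return False
--   if secondstr[0] == firststr[0]:
--     return batseq(secondstr[1:], firststr[1:])
--   else:
--     return batseq(secondstr, firststr[1:])
-- ===== SOURCE B (Python) =====
-- def batseq(firststr, secondstr):
--     # Two-pointer iteration with role swap: no slicing copies, O(len(f)+len(s)).
--     f, i, s, j = firststr, 0, secondstr, 0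
--     while True:
--         if j >= len(s):
--             return True
--         if i >= len(f):
--             return False
--         if s[j] == f[i]:
--             f, i, s, j = s, j + 1, f, i + 1
--         else:
--             f, i, s, j = s, j, f, i + 1
-- ===== Notes on version B (the rewrite author's own statement) =====
-- stated objective: faster
-- what changed: Replaced the recursion that builds O(n) sliced string copies per step with an iterative two-pointer loop that swaps the roles of the two strings and only advances indices.
import Mathlib
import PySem

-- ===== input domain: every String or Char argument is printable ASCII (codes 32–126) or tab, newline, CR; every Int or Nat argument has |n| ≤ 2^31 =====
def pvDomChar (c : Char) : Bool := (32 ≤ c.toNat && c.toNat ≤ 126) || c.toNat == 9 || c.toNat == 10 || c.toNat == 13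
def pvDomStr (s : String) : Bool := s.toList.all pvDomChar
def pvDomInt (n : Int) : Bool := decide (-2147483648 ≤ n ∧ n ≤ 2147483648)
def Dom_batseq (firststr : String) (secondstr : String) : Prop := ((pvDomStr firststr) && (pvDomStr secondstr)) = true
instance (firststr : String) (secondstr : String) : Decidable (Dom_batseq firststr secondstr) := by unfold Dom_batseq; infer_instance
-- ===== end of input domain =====

-- B replaces A's recursion over sliced string copies with an iterative two-pointer
-- loop that swaps the roles of the two strings (objective: faster, asymptotic).


-- ===== PORT A =====
-- A's recursion on the two strings; `secondstr[1:]`/`firststr[1:]` are the list tails.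
def batseqList : List Char → List Char → Bool
  | _, [] => true
  | [], _ :: _ => false
  | a :: f, b :: s =>
      if b == a then batseqList s f else batseqList (b :: s) f
termination_by f s => f.length + s.length

def batseq (firststr : String) (secondstr : String) : Bool :=
  batseqList firststr.toList secondstr.toList

-- ===== PORT B =====
-- B's while-loop: two indices, role swap, no copies.
def batseqLoop (f : List Char) (i : Nat) (s : List Char) (j : Nat) : Bool :=
  if s.length ≤ j then true
  else if f.length ≤ i then false
  else if s.getD j ' ' == f.getD i ' ' then batseqLoop s (j + 1) f (i + 1)
  else batseqLoop s j f (i + 1)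
termination_by (f.length - i) + (s.length - j)
decreasing_by all_goals omega

def batseq_alt (firststr : String) (secondstr : String) : Bool :=
  batseqLoop firststr.toList 0 secondstr.toList 0

-- ===== PRECONDITION & SPEC =====
def Spec_batseq (firststr : String) (secondstr : String) (out : Bool) : Prop := out = batseq_alt firststr secondstr
instance (firststr : String) (secondstr : String) (out : Bool) : Decidable (Spec_batseq firststr secondstr out) := by unfold Spec_batseq; infer_instance

-- ===== CLAIM (what is proved, stated in full; the proofs are below) =====
def Claim_equal_batseq : Prop := ∀ (firststr : String) (secondstr : String), Dom_batseq firststr secondstr → Spec_batseq firststr secondstr (batseq firststr secondstr)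

-- ===== LEMMAS AND PROOFS =====
theorem batseqLoop_eq (f : List Char) (i : Nat) (s : List Char) (j : Nat) :
    batseqLoop f i s j = batseqList (f.drop i) (s.drop j) := by
  fun_induction batseqLoop f i s j with
  | case1 f i s j hj =>
      rw [List.drop_eq_nil_of_le hj, batseqList]
  | case2 f i s j hj hi =>
      rw [List.drop_eq_nil_of_le hi]
      have hj' : j < s.length := by omega
      rw [List.drop_eq_getElem_cons hj', batseqList]
  | case3 f i s j hj hi heq ih =>
      have hj' : j < s.length := by omega
      have hi' : i < f.length := by omega
      rw [List.drop_eq_getElem_cons hj', List.drop_eq_getElem_cons hi', batseqList, ih]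
      simp only [List.getD_eq_getElem?_getD, List.getElem?_eq_getElem hj',
        List.getElem?_eq_getElem hi', Option.getD_some] at heq
      rw [if_pos heq]
  | case4 f i s j hj hi hne ih =>
      have hj' : j < s.length := by omega
      have hi' : i < f.length := by omega
      rw [List.drop_eq_getElem_cons hj', List.drop_eq_getElem_cons hi', batseqList, ih,
        List.drop_eq_getElem_cons hj']
      simp only [List.getD_eq_getElem?_getD, List.getElem?_eq_getElem hj',
        List.getElem?_eq_getElem hi', Option.getD_some] at hne
      rw [if_neg hne]

-- ===== VERDICT (by name: the statement is the Claim_ definition above) =====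
theorem batseq_spec : Claim_equal_batseq := by
  intro f s _
  unfold Spec_batseq batseq batseq_alt
  rw [batseqLoop_eq, List.drop_zero, List.drop_zero]
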